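-- pv_equiv track=rewrite | github.com/rligithub/Leetcode | TwoPointers/159. Longest Substring with At Most Two Distinct Characters.py | generate_substr
-- ===== SOURCE A (Python) =====
-- def generate_substr(s, k):
--     if not s or k == 0:
--         return None
--
--     result = {}
--
--     for i in range(len(s)):
--         if len(s) - i < k:
--             break
--         if len(set(s[i:i + k])) == k:
--             result[s[i:i + k]] = 1
--     return result.keys()
-- ===== SOURCE B (Python) =====
-- def generate_substr(s, k):
--     if not s or k == 0:
--         return None
--     n = len(s)
--     if k < 0 or k > n:
--         return []
--     counts = {}
--     distinct = 0
--     out = {}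
--     for j in range(n):
--         c = s[j]
--         counts[c] = counts.get(c, 0) + 1
--         if counts[c] == 1:
--             distinct += 1
--         if j >= k:
--             d = s[j - k]
--             counts[d] = counts[d] - 1
--             if counts[d] == 0:
--                 distinct -= 1
--         if j >= k - 1 and distinct == k:
--             out[s[j - k + 1:j + 1]] = 1
--     return list(out)
-- ===== Notes on version B (the rewrite author's own statement) =====
-- stated objective: faster
-- what changed: Replaces A's per-index slice-and-build-a-set distinctness test (O(k) work at every start position) with a single sliding-window pass maintaining an incremental character-count dict and a running distinct counter, building the substring key only on a match.
import Mathlib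
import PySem

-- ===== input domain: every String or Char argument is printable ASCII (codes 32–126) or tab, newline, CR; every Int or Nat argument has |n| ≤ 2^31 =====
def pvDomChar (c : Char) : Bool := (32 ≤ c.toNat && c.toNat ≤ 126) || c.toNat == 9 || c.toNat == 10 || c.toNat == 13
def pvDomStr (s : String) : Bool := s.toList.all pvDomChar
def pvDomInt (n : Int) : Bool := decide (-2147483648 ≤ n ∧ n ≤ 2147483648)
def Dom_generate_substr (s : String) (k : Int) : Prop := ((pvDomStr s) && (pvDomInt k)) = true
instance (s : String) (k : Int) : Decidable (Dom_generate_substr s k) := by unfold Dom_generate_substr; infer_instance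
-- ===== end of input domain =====

-- B replaces A's per-window set construction by a single sliding-window pass with an
-- incremental character-count dict and a running distinct counter (objective: faster).

-- ===== PORT A =====
-- 'for i in range(len(s))' with the 'break' ported as structural recursion on the number
-- of remaining iterations (break = return the accumulated dict).
def genLoopA (cs : List Char) (k : Int) : Nat → Int → PySem.Dict String Int → PySem.Dict String Int
  | 0, _, result => result
  | fuel + 1, i, result =>
    if (cs.length : Int) - i < k then result
    else
      let sub := PySem.List.slice cs (some i) (some (i + k))
      let result' := if ((PySem.Set.ofList sub).length : Int) = k
                     then result.insert (String.ofList sub) 1 else result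
      genLoopA cs k fuel (i + 1) result'

def generate_substr (s : String) (k : Int) : Option (List String) :=
  if s.toList = [] ∨ k = 0 then none
  else some ((genLoopA s.toList k s.toList.length 0 PySem.Dict.empty).keys)

-- ===== PORT B =====
-- one pass over j = 0..n-1; s[j] / s[j-k] are provably in range here, ported with pyGetD (exact).
def genLoopB (cs : List Char) (k : Int) :
    Nat → Int → PySem.Dict Char Int → Int → PySem.Dict String Int → PySem.Dict String Int
  | 0, _, _, _, out => out
  | fuel + 1, j, counts, distinct, out =>
    let c := PySem.List.pyGetD cs j ' '
    let counts1 := counts.insert c (counts.getD c 0 + 1)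
    let distinct1 := if counts1.getD c 0 = 1 then distinct + 1 else distinct
    let p :=
      if k ≤ j then
        let d := PySem.List.pyGetD cs (j - k) ' '
        let counts2 := counts1.insert d (counts1.getD d 0 - 1)
        let distinct2 := if counts2.getD d 0 = 0 then distinct1 - 1 else distinct1
        (counts2, distinct2)
      else (counts1, distinct1)
    let out' :=
      if k - 1 ≤ j ∧ p.2 = k
      then out.insert (String.ofList (PySem.List.slice cs (some (j - k + 1)) (some (j + 1)))) 1
      else out
    genLoopB cs k fuel (j + 1) p.1 p.2 out'

def generate_substr_alt (s : String) (k : Int) : Option (List String) :=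
  if s.toList = [] ∨ k = 0 then none
  else if k < 0 ∨ (s.toList.length : Int) < k then some []
  else some ((genLoopB s.toList k s.toList.length 0 PySem.Dict.empty 0 PySem.Dict.empty).keys)

-- ===== PRECONDITION & SPEC =====
def Spec_generate_substr (s : String) (k : Int) (out : Option (List String)) : Prop := out = generate_substr_alt s k
instance (s : String) (k : Int) (out : Option (List String)) : Decidable (Spec_generate_substr s k out) := by unfold Spec_generate_substr; infer_instance

-- ===== CLAIM (what is proved, stated in full; the proofs are below) =====
def Claim_equal_generate_substr : Prop := ∀ (s : String) (k : Int), Dom_generate_substr s k → Spec_generate_substr s k (generate_substr s k)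

-- ===== LEMMAS AND PROOFS =====

-- the dict both loops build: insert each emitted window (value 1) in order
def insWins (d : PySem.Dict String Int) (ws : List String) : PySem.Dict String Int :=
  ws.foldl (fun d w => d.insert w 1) d

-- the windows both programs emit, starting at position i: every length-K window of cs
-- starting at t ∈ [i, n-K] whose characters are pairwise distinct
def winsFrom (cs : List Char) (K i : Nat) : List String :=
  (List.range' i (cs.length + 1 - (K + i))).filterMap (fun t =>
    let w := (cs.drop t).take K
    if w.Nodup then some (String.ofList w) else none)

theorem pvCard_append_singleton (l : List Char) (c : Char) :
    (l ++ [c]).toFinset.card = l.toFinset.card + (if c ∈ l then 0 else 1) := by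
  rw [List.toFinset_append]
  simp only [List.toFinset_cons, List.toFinset_nil, insert_empty_eq]
  rw [Finset.union_comm, Finset.singleton_union]
  by_cases hc : c ∈ l
  · rw [Finset.insert_eq_self.2 (List.mem_toFinset.2 hc), if_pos hc]; ring
  · rw [Finset.card_insert_of_notMem (fun hm => hc (List.mem_toFinset.1 hm)), if_neg hc]

theorem pvCard_cons (d : Char) (t : List Char) :
    (d :: t).toFinset.card = t.toFinset.card + (if d ∈ t then 0 else 1) := by
  rw [List.toFinset_cons]
  by_cases hd : d ∈ t
  · rw [Finset.insert_eq_self.2 (List.mem_toFinset.2 hd), if_pos hd]; ring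
  · rw [Finset.card_insert_of_notMem (fun hm => hd (List.mem_toFinset.1 hm)), if_neg hd]

theorem insWins_cons (d : PySem.Dict String Int) (w : String) (ws : List String) :
    insWins d (w :: ws) = insWins (d.insert w 1) ws := rfl

theorem ofList_length_eq_iff (xs : List Char) :
    (PySem.Set.ofList xs).length = xs.length ↔ xs.Nodup := by
  constructor
  · induction xs using List.reverseRecOn with
    | nil => intro; simp
    | append_singleton xs x ih =>
      intro h
      rw [PySem.Set.ofList_append_singleton, PySem.Set.add_eq_ite] at h
      by_cases hx : x ∈ PySem.Set.ofList xs
      · simp only [hx, if_pos] at h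
        have := PySem.Set.length_ofList_le xs
        simp at h; omega
      · simp only [hx, if_neg, not_false_iff, List.length_append, List.length_singleton] at h
        have hnd := ih (by omega)
        have hxx : x ∉ xs := fun hm => hx ((PySem.Set.mem_ofList xs x).2 hm)
        simp only [List.nodup_append, List.nodup_singleton, true_and]
        exact ⟨hnd, fun a ha b hb => by simp at hb; exact fun h => hxx (hb ▸ h ▸ ha)⟩
  · intro h; rw [PySem.Set.ofList_eq_self_of_nodup _ h]

theorem card_toFinset_eq_iff (l : List Char) : l.toFinset.card = l.length ↔ l.Nodup := by
  rw [List.card_toFinset]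
  constructor
  · intro h
    have := (List.dedup_sublist l).eq_of_length h
    rw [← this]; exact l.nodup_dedup
  · intro h; rw [List.Nodup.dedup h]

-- A's loop from index i collects exactly the distinct-character windows starting at ≥ i
theorem genLoopA_eq (cs : List Char) (K : Nat) (hK : 1 ≤ K) :
    ∀ (m i : Nat) (d : PySem.Dict String Int), i + m = cs.length →
      genLoopA cs (K : Int) m (i : Int) d = insWins d (winsFrom cs K i) := by
  intro m
  induction m with
  | zero =>
    intro i d h
    have h0 : cs.length + 1 - (K + i) = 0 := by omega
    simp [genLoopA, winsFrom, h0, insWins]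
  | succ m ih =>
    intro i d h
    simp only [genLoopA]
    by_cases hbr : (cs.length : Int) - (i : Int) < (K : Int)
    · rw [if_pos hbr]
      have hb : cs.length < i + K := by exact_mod_cast by omega
      have h0 : cs.length + 1 - (K + i) = 0 := by omega
      simp [winsFrom, h0, insWins]
    · rw [if_neg hbr]
      have hKi : i + K ≤ cs.length := by
        have : (K : Int) ≤ (cs.length : Int) - (i : Int) := not_lt.1 hbr
        exact_mod_cast by omega
      have hslice : PySem.List.slice cs (some (i : Int)) (some ((i : Int) + (K : Int)))
          = (cs.drop i).take K := by
        have h1 : ((i : Int) + (K : Int)) = ((i + K : Nat) : Int) := by push_cast; ring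
        rw [h1, PySem.List.slice_natCast]
        congr 1; omega
      have hwlen : ((cs.drop i).take K).length = K := by
        simp [List.length_take, List.length_drop]; omega
      have hcond' : ∀ w : List Char, w.length = K →
          ((((PySem.Set.ofList w).length : Int) = (K : Int)) ↔ w.Nodup) := by
        intro w hw
        rw [Int.natCast_inj, ← hw, ofList_length_eq_iff]
      have hcond := hcond' ((cs.drop i).take K) hwlen
      have hcnt : cs.length + 1 - (K + i) = (cs.length + 1 - (K + (i + 1))) + 1 := by omega
      have hrange : List.range' i (cs.length + 1 - (K + i))
          = i :: List.range' (i + 1) (cs.length + 1 - (K + (i + 1))) := by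
        rw [hcnt, List.range'_succ]
      have hcast : (i : Int) + 1 = ((i + 1 : Nat) : Int) := by push_cast; ring
      by_cases hnd : ((cs.drop i).take K).Nodup
      · simp only [hslice, hcond, if_pos hnd, hcast]
        rw [ih (i + 1) _ (by omega)]
        unfold winsFrom
        rw [hrange, List.filterMap_cons]
        simp only [if_pos hnd, insWins_cons]
      · simp only [hslice, hcond, if_neg hnd, hcast]
        rw [ih (i + 1) _ (by omega)]
        unfold winsFrom
        rw [hrange, List.filterMap_cons]
        simp only [if_neg hnd]

-- window of the sliding pass after j characters have been consumed
def pvWin (cs : List Char) (K j : Nat) : List Char := (cs.take j).drop (j - K)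

-- the tail of one iteration of B's loop: emit (or not) the window ending at j, then recurse
theorem pvFinish (cs : List Char) (K : Nat) (hK : 1 ≤ K)
    (m j : Nat) (h : j + (m + 1) = cs.length)
    (counts' : PySem.Dict Char Int) (distinct' : Int) (out : PySem.Dict String Int)
    (hc : ∀ x, counts'.getD x 0 = ((pvWin cs K (j + 1)).count x : Int))
    (hd : distinct' = ((pvWin cs K (j + 1)).toFinset.card : Int))
    (IH : ∀ (j : Nat) (counts : PySem.Dict Char Int) (distinct : Int) (out : PySem.Dict String Int),
      j + m = cs.length →
      (∀ c, counts.getD c 0 = ((pvWin cs K j).count c : Int)) →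
      distinct = ((pvWin cs K j).toFinset.card : Int) →
      genLoopB cs (K : Int) m (j : Int) counts distinct out = insWins out (winsFrom cs K (j + 1 - K))) :
    genLoopB cs (K : Int) m ((j : Int) + 1) counts' distinct'
      (if ((K : Int) - 1 ≤ (j : Int) ∧ distinct' = (K : Int))
       then out.insert (String.ofList (PySem.List.slice cs (some ((j : Int) - (K : Int) + 1)) (some ((j : Int) + 1)))) 1
       else out)
    = insWins out (winsFrom cs K (j + 1 - K)) := by
  have hj1 : (j : Int) + 1 = ((j + 1 : Nat) : Int) := by push_cast; ring
  rw [hj1]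
  by_cases hKe : K ≤ j + 1
  · have hlen : (pvWin cs K (j + 1)).length = K := by
      unfold pvWin; simp only [List.length_drop, List.length_take]; omega
    have hiff : distinct' = (K : Int) ↔ (pvWin cs K (j + 1)).Nodup := by
      rw [hd]
      constructor
      · intro hh
        have hck : (pvWin cs K (j + 1)).toFinset.card = K := by exact_mod_cast hh
        exact (card_toFinset_eq_iff _).1 (by rw [hck, hlen])
      · intro hh
        have := (card_toFinset_eq_iff _).2 hh
        rw [this, hlen]
    have hsl : PySem.List.slice cs (some ((j : Int) - (K : Int) + 1)) (some ((j + 1 : Nat) : Int))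
        = pvWin cs K (j + 1) := by
      have e1 : (j : Int) - (K : Int) + 1 = ((j + 1 - K : Nat) : Int) := by omega
      rw [e1, PySem.List.slice_natCast]
      unfold pvWin
      rw [List.drop_take]
    have hwf : winsFrom cs K (j + 1 - K)
        = (if (pvWin cs K (j + 1)).Nodup then [String.ofList (pvWin cs K (j + 1))] else [])
          ++ winsFrom cs K (j + 1 + 1 - K) := by
      unfold winsFrom
      have hcnt1 : cs.length + 1 - (K + (j + 1 - K)) = (cs.length + 1 - (K + (j + 1 + 1 - K))) + 1 := by
        omega
      have hstart : j + 1 - K + 1 = j + 1 + 1 - K := by omega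
      rw [hcnt1, List.range'_succ, List.filterMap_cons, hstart]
      have hwW : (cs.drop (j + 1 - K)).take K = pvWin cs K (j + 1) := by
        unfold pvWin; rw [List.drop_take]; congr 1; omega
      by_cases hnd : (pvWin cs K (j + 1)).Nodup
      · simp [hwW, hnd]
      · simp [hwW, hnd]
    rw [hwf]
    by_cases hnd : (pvWin cs K (j + 1)).Nodup
    · rw [if_pos ⟨by omega, hiff.2 hnd⟩, hsl, if_pos hnd]
      rw [IH (j + 1) _ _ _ (by omega) hc hd, List.singleton_append, insWins_cons]
    · have hnotc : ¬ ((K : Int) - 1 ≤ (j : Int) ∧ distinct' = (K : Int)) := fun hp => hnd (hiff.1 hp.2)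
      rw [if_neg hnotc, if_neg hnd, List.nil_append]
      exact IH (j + 1) _ _ _ (by omega) hc hd
  · have hnotc : ¬ ((K : Int) - 1 ≤ (j : Int) ∧ distinct' = (K : Int)) := by
      intro hp
      have h1 := hp.1
      omega
    rw [if_neg hnotc, IH (j + 1) _ _ _ (by omega) hc hd]
    have heq : j + 1 - K = j + 1 + 1 - K := by omega
    rw [heq]

-- B's loop from step j, with counts/distinct describing the current window,
-- collects exactly the remaining distinct-character windows
theorem genLoopB_eq (cs : List Char) (K : Nat) (hK : 1 ≤ K) (hKn : K ≤ cs.length) :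
    ∀ (m j : Nat) (counts : PySem.Dict Char Int) (distinct : Int) (out : PySem.Dict String Int),
      j + m = cs.length →
      (∀ c, counts.getD c 0 = ((pvWin cs K j).count c : Int)) →
      distinct = ((pvWin cs K j).toFinset.card : Int) →
      genLoopB cs (K : Int) m (j : Int) counts distinct out
        = insWins out (winsFrom cs K (j + 1 - K)) := by
  intro m
  induction m with
  | zero =>
    intro j counts distinct out h _ _
    have h0 : cs.length + 1 - (K + (j + 1 - K)) = 0 := by omega
    simp [genLoopB, winsFrom, h0, insWins]
  | succ m ih =>
    intro j counts distinct out h hcnt hdst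
    have hj : j < cs.length := by omega
    have hgetj : PySem.List.pyGetD cs ((j : Nat) : Int) ' ' = cs[j] := by
      rw [PySem.List.pyGetD_natCast, List.getD_eq_getElem _ _ hj]
    simp only [genLoopB, hgetj]
    -- invariants for the window extended on the right by cs[j]
    have hc1 : ∀ x, (counts.insert cs[j] (counts.getD cs[j] 0 + 1)).getD x 0
        = ((pvWin cs K j ++ [cs[j]]).count x : Int) := by
      intro x
      rw [PySem.Dict.getD_insert]
      by_cases hx : x = cs[j]
      · subst hx
        rw [if_pos rfl, hcnt]
        simp [List.count_append]
      · rw [if_neg hx, hcnt]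
        have : List.count x [cs[j]] = 0 := by
          simp only [List.count_singleton, beq_iff_eq, ite_eq_right_iff]
          intro hh; exact absurd hh.symm hx
        rw [List.count_append, this]
        push_cast; ring
    have hd1 : (if (counts.insert cs[j] (counts.getD cs[j] 0 + 1)).getD cs[j] 0 = 1
          then distinct + 1 else distinct)
        = (((pvWin cs K j ++ [cs[j]]).toFinset.card : Nat) : Int) := by
      rw [PySem.Dict.getD_insert_self, hcnt, hdst, pvCard_append_singleton]
      by_cases hm : cs[j] ∈ pvWin cs K j
      · have hpos : 1 ≤ List.count cs[j] (pvWin cs K j) := List.count_pos_iff.2 hm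
        rw [if_neg (by omega), if_pos hm]
        push_cast; ring
      · rw [if_pos (by rw [List.count_eq_zero.2 hm]; norm_num), if_neg hm]
        push_cast; ring
    by_cases hKj : K ≤ j
    · -- the window also loses its leftmost character cs[j-K]
      have hjK : j - K < cs.length := by omega
      have hgetd : PySem.List.pyGetD cs ((j : Int) - (K : Int)) ' ' = cs[j - K] := by
        have e : (j : Int) - (K : Int) = ((j - K : Nat) : Int) := by omega
        rw [e, PySem.List.pyGetD_natCast, List.getD_eq_getElem _ _ hjK]
      have hle : (K : Int) ≤ (j : Int) := by exact_mod_cast hKj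
      rw [if_pos hle]
      dsimp only
      rw [hgetd]
      have htl : j - K < (cs.take j).length := by
        simp only [List.length_take]; omega
      have hWd : pvWin cs K j = cs[j - K] :: (cs.take j).drop (j - K + 1) := by
        unfold pvWin
        rw [List.drop_eq_getElem_cons htl, List.getElem_take]
      have hW1 : pvWin cs K (j + 1) = (cs.take j).drop (j - K + 1) ++ [cs[j]] := by
        unfold pvWin
        rw [List.take_add_one, List.getElem?_eq_getElem hj]
        have e : j + 1 - K = j - K + 1 := by omega
        rw [e, List.drop_append_of_le_length (by simp only [List.length_take]; omega)]
        rfl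
      have hdcons : pvWin cs K j ++ [cs[j]] = cs[j - K] :: ((cs.take j).drop (j - K + 1) ++ [cs[j]]) := by
        rw [hWd]; rfl
      -- counts after the decrement
      have hc2 : ∀ x, ((counts.insert cs[j] (counts.getD cs[j] 0 + 1)).insert cs[j - K]
            ((counts.insert cs[j] (counts.getD cs[j] 0 + 1)).getD cs[j - K] 0 - 1)).getD x 0
          = ((pvWin cs K (j + 1)).count x : Int) := by
        intro x
        rw [PySem.Dict.getD_insert, hW1]
        by_cases hx : x = cs[j - K]
        · subst hx
          rw [if_pos rfl, hc1, hdcons, List.count_cons_self]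
          push_cast; ring
        · rw [if_neg hx, hc1, hdcons]
          have : List.count x (cs[j - K] :: ((cs.take j).drop (j - K + 1) ++ [cs[j]]))
              = List.count x ((cs.take j).drop (j - K + 1) ++ [cs[j]]) := by
            rw [List.count_cons]
            simp only [beq_iff_eq, ite_eq_right_iff, add_eq_left]
            intro hh; exact absurd hh.symm hx
          rw [this]
      -- distinct after the decrement
      have hd2 : (if ((counts.insert cs[j] (counts.getD cs[j] 0 + 1)).insert cs[j - K]
              ((counts.insert cs[j] (counts.getD cs[j] 0 + 1)).getD cs[j - K] 0 - 1)).getD cs[j - K] 0 = 0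
            then (if (counts.insert cs[j] (counts.getD cs[j] 0 + 1)).getD cs[j] 0 = 1
                  then distinct + 1 else distinct) - 1
            else (if (counts.insert cs[j] (counts.getD cs[j] 0 + 1)).getD cs[j] 0 = 1
                  then distinct + 1 else distinct))
          = ((pvWin cs K (j + 1)).toFinset.card : Int) := by
        rw [hd1, hc2 cs[j - K], hW1, hdcons, pvCard_cons]
        by_cases hdm : cs[j - K] ∈ (cs.take j).drop (j - K + 1) ++ [cs[j]]
        · have hpos : 1 ≤ List.count cs[j - K] ((cs.take j).drop (j - K + 1) ++ [cs[j]]) :=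
            List.count_pos_iff.2 hdm
          rw [if_neg (by omega), if_pos hdm]
          push_cast; ring
        · rw [if_pos (by rw [List.count_eq_zero.2 hdm]; norm_num), if_neg hdm]
          push_cast; ring
      exact pvFinish cs K hK m j h _ _ out hc2 hd2 ih
    · have hle : ¬ ((K : Int) ≤ (j : Int)) := by exact_mod_cast hKj
      rw [if_neg hle]
      dsimp only
      have hW1 : pvWin cs K (j + 1) = pvWin cs K j ++ [cs[j]] := by
        unfold pvWin
        have e0 : j - K = 0 := by omega
        have e1 : j + 1 - K = 0 := by omega
        rw [e0, e1, List.take_add_one, List.getElem?_eq_getElem hj]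
        rfl
      have hc1' : ∀ x, (counts.insert cs[j] (counts.getD cs[j] 0 + 1)).getD x 0
          = ((pvWin cs K (j + 1)).count x : Int) := by
        intro x; rw [hW1]; exact hc1 x
      have hd1' : (if (counts.insert cs[j] (counts.getD cs[j] 0 + 1)).getD cs[j] 0 = 1
            then distinct + 1 else distinct)
          = ((pvWin cs K (j + 1)).toFinset.card : Int) := by
        rw [hW1]; exact hd1
      exact pvFinish cs K hK m j h _ _ out hc1' hd1' ih

-- for k < 0 the distinctness test of A can never succeed, so its loop collects nothing
theorem genLoopA_neg (cs : List Char) (k : Int) (hk : k < 0) :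
    ∀ (m : Nat) (i : Int) (d : PySem.Dict String Int), 0 ≤ i → i + m ≤ (cs.length : Int) →
      genLoopA cs k m i d = d := by
  intro m
  induction m with
  | zero => intro i d _ _; rfl
  | succ m ih =>
    intro i d hi hm
    simp only [genLoopA]
    have hnb : ¬ ((cs.length : Int) - i < k) := by push_cast at hm ⊢; omega
    rw [if_neg hnb]
    have hno : ¬ (((PySem.Set.ofList (PySem.List.slice cs (some i) (some (i + k)))).length : Int) = k) := by
      intro hh
      have := Int.natCast_nonneg (PySem.Set.ofList (PySem.List.slice cs (some i) (some (i + k)))).length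
      omega
    rw [if_neg hno]
    exact ih (i + 1) d (by omega) (by push_cast at hm ⊢; omega)

-- ===== VERDICT (by name: the statement is the Claim_ definition above) =====
theorem generate_substr_spec : Claim_equal_generate_substr := by
  intro s k _
  unfold Spec_generate_substr generate_substr generate_substr_alt
  by_cases h0 : s.toList = [] ∨ k = 0
  · rw [if_pos h0, if_pos h0]
  · rw [if_neg h0, if_neg h0]
    have hne : s.toList ≠ [] := fun hh => h0 (Or.inl hh)
    have hk0 : k ≠ 0 := fun hh => h0 (Or.inr hh)
    by_cases hks : k < 0 ∨ (s.toList.length : Int) < k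
    · rw [if_pos hks]
      rcases hks with hneg | hbig
      · rw [genLoopA_neg s.toList k hneg s.toList.length 0 PySem.Dict.empty le_rfl (by omega)]
        rfl
      · rcases hcs : s.toList with _ | ⟨c, rest⟩
        · exact absurd hcs hne
        · rw [hcs] at hbig
          simp only [List.length_cons, genLoopA]
          rw [if_pos (by simp only [List.length_cons] at hbig; omega)]
          rfl
    · rw [if_neg hks]
      push Not at hks
      obtain ⟨hk1, hk2⟩ := hks
      have hK1 : 1 ≤ k.toNat := by omega
      have hkK : k = (k.toNat : Int) := by omega
      have hKn : k.toNat ≤ s.toList.length := by omega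
      have hA := genLoopA_eq s.toList k.toNat hK1 s.toList.length 0 PySem.Dict.empty (by omega)
      have hB := genLoopB_eq s.toList k.toNat hK1 hKn s.toList.length 0 PySem.Dict.empty 0
        PySem.Dict.empty (by omega)
        (by intro c; simp [pvWin, PySem.Dict.getD_empty])
        (by simp [pvWin])
      rw [Nat.cast_zero] at hA hB
      rw [hkK, hA, hB, show 0 + 1 - k.toNat = 0 from by omega]
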